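-- pv_equiv track=rewrite | github.com/Polyrom/ya-algo | sprint_8/non-finals/e_insert_string.py | solution
-- ===== SOURCE A (Python) =====
-- from collections import defaultdict
--
-- def solution(string: str, pairs: list[tuple[str, int]]) -> str:
--     insertions = defaultdict(list)
--     for t, k in pairs:
--         insertions[k].append(t)
--
--     result = []
--
--     if 0 in insertions:
--         result.extend(insertions[0])
--
--     for i in range(len(string)):
--         result.append(string[i])
--         if i + 1 in insertions:
--             result.extend(insertions[i + 1])
--
--     return "".join(result)
-- ===== SOURCE B (Python) =====
-- def solution(string: str, pairs: list[tuple[str, int]]) -> str: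
--     valid = [(t, k) for t, k in pairs if 0 <= k <= len(string)]
--     valid.sort(key=lambda p: p[1])
--     parts = []
--     prev = 0
--     for t, k in valid:
--         parts.append(string[prev:k])
--         parts.append(t)
--         prev = k
--     parts.append(string[prev:])
--     return "".join(parts)
-- ===== Notes on version B (the rewrite author's own statement) =====
-- stated objective: alternative
-- what changed: B replaces A's defaultdict grouping plus character-by-character scan with a filter of in-range insertions, a stable sort by position, and a single merge that copies string slices between consecutive insertion points.
import Mathlib
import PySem

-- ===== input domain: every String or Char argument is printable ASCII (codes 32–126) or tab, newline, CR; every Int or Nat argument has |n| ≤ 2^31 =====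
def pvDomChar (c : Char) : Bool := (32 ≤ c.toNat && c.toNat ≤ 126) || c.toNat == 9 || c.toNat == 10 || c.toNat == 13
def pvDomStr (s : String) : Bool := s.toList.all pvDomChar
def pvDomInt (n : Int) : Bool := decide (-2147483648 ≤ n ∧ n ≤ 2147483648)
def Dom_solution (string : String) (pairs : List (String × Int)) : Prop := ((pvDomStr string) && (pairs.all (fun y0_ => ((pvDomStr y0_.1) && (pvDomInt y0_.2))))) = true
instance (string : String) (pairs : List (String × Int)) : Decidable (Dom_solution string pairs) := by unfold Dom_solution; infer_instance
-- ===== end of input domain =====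

-- B replaces A's defaultdict grouping plus per-character scan by filter + stable sort by
-- position + one slice-copying merge; same return value on every input (objective: alternative).

-- ===== PORT A =====
-- the defaultdict-building loop: insertions[k].append(t)
def groupIns (pairs : List (String × Int)) : PySem.Dict Int (List String) :=
  pairs.foldl (fun d p => d.modify p.2 [] (fun l => l ++ [p.1])) PySem.Dict.empty

def solution (string : String) (pairs : List (String × Int)) : String :=
  let insertions := groupIns pairs
  let result : List String :=
    if insertions.contains 0 then [] ++ insertions.getD 0 [] else []
  let result :=
    (PySem.List.pyRange 0 (PySem.Str.len string) 1).foldl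
      (fun acc i =>
        -- result.append(string[i]); string[i] is always in range here
        let acc := acc ++ [String.ofList [(PySem.Str.pyGet? string i).getD ' ']]
        if insertions.contains (i + 1) then acc ++ insertions.getD (i + 1) [] else acc)
      result
  PySem.Str.join "" result

-- ===== PORT B =====
def solution_alt (string : String) (pairs : List (String × Int)) : String :=
  let valid := pairs.filter (fun p => decide (0 ≤ p.2) && decide (p.2 ≤ PySem.Str.len string))
  let validSorted := PySem.List.sorted valid (fun p => p.2)
  let res := validSorted.foldl
      (fun (st : List String × Int) p =>
        (st.1 ++ [PySem.Str.slice string (some st.2) (some p.2), p.1], p.2))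
      ([], 0)
  PySem.Str.join "" (res.1 ++ [PySem.Str.slice string (some res.2) none])

-- ===== PRECONDITION & SPEC =====
def Spec_solution (string : String) (pairs : List (String × Int)) (out : String) : Prop := out = solution_alt string pairs
instance (string : String) (pairs : List (String × Int)) (out : String) : Decidable (Spec_solution string pairs out) := by unfold Spec_solution; infer_instance

-- ===== CLAIM (what is proved, stated in full; the proofs are below) =====
def Claim_equal_solution : Prop := ∀ (string : String) (pairs : List (String × Int)), Dom_solution string pairs → Spec_solution string pairs (solution string pairs)

-- ===== LEMMAS AND PROOFS =====

-- chars of "".join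
def catS (l : List String) : List Char := (l.map String.toList).flatten

-- the strings inserted at position j
def grp (pairs : List (String × Int)) (j : Int) : List String :=
  (pairs.filter (fun p => p.2 == j)).map Prod.fst

-- canonical interleaving: insertions F j before each position j, chars in between
def canonC : List Char → Int → (Int → List Char) → List Char
  | [], j, F => F j
  | c :: cs, j, F => F j ++ c :: canonC cs (j + 1) F

theorem join_empty_sep (l : List (List Char)) : PySem.Chars.join [] l = l.flatten := by
  induction l with
  | nil => simp [PySem.Chars.join_nil]
  | cons x t ih =>
    cases t with
    | nil => simp [PySem.Chars.join_singleton]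
    | cons y u => rw [PySem.Chars.join_cons_cons] at *; simp [ih]

theorem catS_append (a b : List String) : catS (a ++ b) = catS a ++ catS b := by
  simp [catS]

-- A-side: the grouped dict looks up to grp
theorem getD_groupIns (pairs : List (String × Int)) (j : Int) :
    (groupIns pairs).getD j [] = grp pairs j := by
  have h := PySem.Dict.getD_foldl_modify_append (pairs.map (fun p => (p.2, p.1)))
      (PySem.Dict.empty (κ := Int) (ν := List String)) j
  rw [List.foldl_map] at h
  simpa [groupIns, grp, List.filter_map, Function.comp] using h

theorem grp_eq_nil_of_not_contains (pairs : List (String × Int)) (j : Int)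
    (h : (groupIns pairs).contains j = false) : grp pairs j = [] := by
  have hk : (groupIns pairs).keys = PySem.Set.update (PySem.Dict.empty (κ := Int) (ν := List String)).keys (pairs.map (fun p => p.2)) :=
    PySem.Dict.keys_foldl_modify_key pairs (fun p => p.2) [] (fun _ p l => l ++ [p.1]) _
  have hmem : j ∉ (groupIns pairs).keys := by
    intro hj
    rw [(PySem.Dict.contains_iff_mem_keys _ _).mpr hj] at h
    simp at h
  rw [hk] at hmem
  have : j ∉ pairs.map (fun p => p.2) := by
    intro hj; exact hmem ((PySem.Set.mem_update _ _ _).mpr (Or.inr hj))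
  refine List.map_eq_nil_iff.mpr (List.filter_eq_nil_iff.mpr ?_)
  intro p hp hpj
  exact this (List.mem_map.mpr ⟨p, hp, by simpa using (beq_iff_eq.mp hpj)⟩)

theorem extend_eq (pairs : List (String × Int)) (acc : List String) (j : Int) :
    (if (groupIns pairs).contains j then acc ++ (groupIns pairs).getD j [] else acc)
      = acc ++ grp pairs j := by
  by_cases h : (groupIns pairs).contains j = true
  · simp [h, getD_groupIns]
  · simp [h, grp_eq_nil_of_not_contains pairs j (by simpa using h)]

-- A's index loop accumulates one character and the insertions after it, per index
theorem A_loop (string : String) (pairs : List (String × Int)) (m : Nat) (acc : List String) :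
    (PySem.List.pyRange 0 (m : Int) 1).foldl
      (fun acc i =>
        let acc := acc ++ [String.ofList [(PySem.Str.pyGet? string i).getD ' ']]
        if (groupIns pairs).contains (i + 1) then acc ++ (groupIns pairs).getD (i + 1) [] else acc)
      acc
    = acc ++ (List.range m).flatMap
        (fun (i : Nat) => String.ofList [(PySem.Str.pyGet? string (i : Int)).getD ' '] :: grp pairs ((i : Int) + 1)) := by
  induction m generalizing acc with
  | zero => simp [PySem.List.pyRange_one_eq_nil]
  | succ m ih =>
    have hsplit : PySem.List.pyRange 0 ((m + 1 : Nat) : Int) 1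
        = PySem.List.pyRange 0 (m : Int) 1 ++ [(m : Int)] := by
      have := PySem.List.pyRange_one_succ_right (a := 0) (b := (m : Int)) (by positivity)
      simpa [Nat.cast_add, Nat.cast_one] using this
    rw [hsplit, List.foldl_append, ih]
    simp only [List.foldl_cons, List.foldl_nil, List.range_succ, List.flatMap_append,
      List.flatMap_singleton]
    rw [extend_eq]
    simp [List.append_assoc]

theorem canon_range (cs : List Char) (j : Int) (F : Int → List Char) :
    canonC cs j F
      = F j ++ (List.range cs.length).flatMap (fun i => cs.getD i ' ' :: F (j + (i : Int) + 1)) := by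
  induction cs generalizing j with
  | nil => simp [canonC]
  | cons c cs ih =>
    rw [canonC, ih]
    simp only [List.length_cons]
    rw [List.range_succ_eq_map, List.flatMap_cons, List.flatMap_map]
    have harg : List.flatMap (fun i => cs.getD i ' ' :: F (j + 1 + (i : Int) + 1)) (List.range cs.length)
        = List.flatMap (fun i => (c :: cs).getD i.succ ' ' :: F (j + (i.succ : Int) + 1)) (List.range cs.length) := by
      refine List.flatMap_congr ?_
      intro i _
      have h2 : j + 1 + (i : Int) + 1 = j + ((i.succ : Nat) : Int) + 1 := by push_cast; ring
      rw [h2]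
      rfl
    rw [harg]
    simp [List.getD]

theorem catS_cons (x : String) (l : List String) : catS (x :: l) = x.toList ++ catS l := by
  simp [catS]

theorem catS_flatMap {β : Type} (l : List β) (f : β → List String) :
    catS (l.flatMap f) = l.flatMap (fun x => catS (f x)) := by
  induction l with
  | nil => simp [catS]
  | cons x l ih => rw [List.flatMap_cons, catS_append, ih, List.flatMap_cons]

-- chars of A's result
theorem A_chars (string : String) (pairs : List (String × Int)) :
    (solution string pairs).toList = canonC string.toList 0 (fun j => catS (grp pairs j)) := by
  rw [solution]
  simp only []
  rw [show PySem.Str.len string = ((string.toList.length : Nat) : Int) from by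
    simpa using PySem.Str.len_eq string]
  rw [show (if (groupIns pairs).contains 0 then ([] : List String) ++ (groupIns pairs).getD 0 [] else []) = [] ++ grp pairs 0 from extend_eq pairs [] 0]
  rw [A_loop string pairs string.toList.length ([] ++ grp pairs 0)]
  rw [PySem.Str.toList_join, show ("" : String).toList = [] from rfl, join_empty_sep, ← catS,
    List.nil_append, catS_append, catS_flatMap, canon_range]
  congr 1
  refine List.flatMap_congr ?_
  intro i hi
  have hi' := List.mem_range.mp hi
  rw [catS_cons]
  have hchr : (String.ofList [(PySem.Str.pyGet? string (i : Int)).getD ' ']).toList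
      = [string.toList.getD i ' '] := by
    simp [List.getD, List.getElem?_eq_getElem hi']
  rw [hchr]
  have : (0 : Int) + (i : Int) + 1 = (i : Int) + 1 := by ring
  rw [this]
  rfl

-- ---- B side ----

theorem canon_congr (cs : List Char) (j : Int) (F F' : Int → List Char)
    (h : ∀ i : Int, j ≤ i → i ≤ j + cs.length → F i = F' i) :
    canonC cs j F = canonC cs j F' := by
  induction cs generalizing j with
  | nil => exact h j le_rfl (by simp)
  | cons c cs ih =>
    have hlen : (((c :: cs).length : Nat) : Int) = (cs.length : Int) + 1 := by simp
    rw [canonC, canonC, h j le_rfl (by rw [hlen]; omega),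
      ih (j + 1) (fun i h1 h2 => h i (by omega) (by rw [hlen]; omega))]

theorem canon_nilF (cs : List Char) (j : Int) (F : Int → List Char)
    (h : ∀ i : Int, j ≤ i → i ≤ j + cs.length → F i = []) :
    canonC cs j F = cs := by
  induction cs generalizing j with
  | nil => simpa using h j le_rfl (by simp)
  | cons c cs ih =>
    have hlen : (((c :: cs).length : Nat) : Int) = (cs.length : Int) + 1 := by simp
    rw [canonC, h j le_rfl (by rw [hlen]; omega),
      ih (j + 1) (fun i h1 h2 => h i (by omega) (by rw [hlen]; omega))]
    simp

theorem canon_append (u v : List Char) (j : Int) (F : Int → List Char)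
    (h0 : ∀ i : Int, j ≤ i → i < j + u.length → F i = []) :
    canonC (u ++ v) j F = u ++ canonC v (j + u.length) F := by
  induction u generalizing j with
  | nil => simp
  | cons c u ih =>
    have hlen : (((c :: u).length : Nat) : Int) = (u.length : Int) + 1 := by simp
    rw [List.cons_append, canonC, h0 j le_rfl (by rw [hlen]; omega),
      ih (j + 1) (fun i h1 h2 => h0 i (by omega) (by rw [hlen]; omega))]
    rw [hlen]
    have : j + 1 + (u.length : Int) = j + ((u.length : Int) + 1) := by ring
    rw [this]
    simp

theorem canon_head (cs : List Char) (j : Int) (t : List Char) (F F' : Int → List Char)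
    (hj : F j = t ++ F' j)
    (h : ∀ i : Int, j < i → i ≤ j + cs.length → F i = F' i) :
    canonC cs j F = t ++ canonC cs j F' := by
  cases cs with
  | nil => simpa [canonC] using hj
  | cons c cs =>
    have hlen : (((c :: cs).length : Nat) : Int) = (cs.length : Int) + 1 := by simp
    rw [canonC, canonC, hj,
      canon_congr cs (j + 1) F F' (fun i h1 h2 => h i (by omega) (by rw [hlen]; omega))]
    simp

-- stability of PySem's insertion sort w.r.t. filtering one key
theorem filter_insertBy_ne (x : String × Int) (ys : List (String × Int)) (j : Int) (hx : x.2 ≠ j) :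
    ((PySem.List.insertBy (fun a b => decide (a.2 < b.2)) x ys).filter (fun p => p.2 == j))
      = ys.filter (fun p => p.2 == j) := by
  induction ys with
  | nil => simp [PySem.List.insertBy, List.filter, hx]
  | cons y ys ih =>
    rw [PySem.List.insertBy]
    by_cases h : (x.2 < y.2)
    · simp [h, List.filter, hx]
    · simp only [h, decide_false, Bool.false_eq_true, if_false, List.filter]
      rw [ih]

theorem filter_insertBy_eq (x : String × Int) (ys : List (String × Int))
    (hs : ys.Pairwise (fun a b => a.2 ≤ b.2)) :
    ((PySem.List.insertBy (fun a b => decide (a.2 < b.2)) x ys).filter (fun p => p.2 == x.2))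
      = ys.filter (fun p => p.2 == x.2) ++ [x] := by
  induction ys with
  | nil => simp [PySem.List.insertBy]
  | cons y ys ih =>
    rw [PySem.List.insertBy]
    rcases List.pairwise_cons.mp hs with ⟨hy, hys⟩
    by_cases h : (x.2 < y.2)
    · simp only [h, decide_true, if_true]
      have hnil : (y :: ys).filter (fun p => p.2 == x.2) = [] := by
        refine List.filter_eq_nil_iff.mpr ?_
        intro p hp hpj
        have hpx : p.2 = x.2 := by simpa using hpj
        rcases List.mem_cons.mp hp with rfl | hp'
        · omega
        · have := hy p hp'; omega
      rw [show ((x :: y :: ys).filter (fun p => p.2 == x.2)) = x :: (y :: ys).filter (fun p => p.2 == x.2) from by simp [List.filter], hnil]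
      simp
    · simp only [h, decide_false, Bool.false_eq_true, if_false, List.filter]
      rw [ih hys]
      by_cases hyx : (y.2 == x.2)
      · simp [hyx]
      · simp [hyx]

theorem pairwise_insertBy (x : String × Int) (ys : List (String × Int))
    (hs : ys.Pairwise (fun a b => a.2 ≤ b.2)) :
    (PySem.List.insertBy (fun a b => decide (a.2 < b.2)) x ys).Pairwise (fun a b => a.2 ≤ b.2) := by
  induction ys with
  | nil => simp [PySem.List.insertBy]
  | cons y ys ih =>
    rw [PySem.List.insertBy]
    rcases List.pairwise_cons.mp hs with ⟨hy, hys⟩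
    by_cases h : (x.2 < y.2)
    · simp only [h, decide_true, if_true]
      refine List.pairwise_cons.mpr ⟨?_, hs⟩
      intro p hp
      rcases List.mem_cons.mp hp with rfl | hp'
      · omega
      · have := hy p hp'; omega
    · simp only [h, decide_false, Bool.false_eq_true, if_false]
      refine List.pairwise_cons.mpr ⟨?_, ih hys⟩
      intro p hp
      rcases (PySem.List.mem_insertBy _ _ _ _).mp hp with rfl | hp'
      · omega
      · exact hy p hp'

theorem filter_foldl_insertBy (l acc : List (String × Int)) (j : Int)
    (hs : acc.Pairwise (fun a b => a.2 ≤ b.2)) :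
    ((l.foldl (fun acc x => PySem.List.insertBy (fun a b => decide (a.2 < b.2)) x acc) acc).filter
        (fun p => p.2 == j))
      = acc.filter (fun p => p.2 == j) ++ l.filter (fun p => p.2 == j) := by
  induction l generalizing acc with
  | nil => simp
  | cons x l ih =>
    rw [List.foldl_cons, ih _ (pairwise_insertBy x acc hs)]
    by_cases hx : x.2 = j
    · subst hx
      rw [filter_insertBy_eq x acc hs]
      simp [List.filter, List.append_assoc]
    · rw [filter_insertBy_ne x acc j hx]
      have hxb : (x.2 == j) = false := by simpa using hx
      simp [List.filter, hxb]

theorem filter_sorted (l : List (String × Int)) (j : Int) :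
    ((PySem.List.sorted l (fun p => p.2)).filter (fun p => p.2 == j))
      = l.filter (fun p => p.2 == j) := by
  rw [PySem.List.sorted_eq_foldl_insertBy]
  simpa using filter_foldl_insertBy l [] j (by simp)

-- the slice-copying merge of B equals the canonical interleaving
theorem B_merge (string : String) (l : List (String × Int)) (prev : Int) (parts : List String)
    (hs : l.Pairwise (fun a b => a.2 ≤ b.2))
    (hb : ∀ p ∈ l, prev ≤ p.2 ∧ p.2 ≤ (string.toList.length : Int))
    (h0 : 0 ≤ prev) (hn : prev ≤ (string.toList.length : Int)) :
    catS ((l.foldl (fun (st : List String × Int) p =>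
          (st.1 ++ [PySem.Str.slice string (some st.2) (some p.2), p.1], p.2)) (parts, prev)).1)
      ++ PySem.Chars.slice string.toList
          (some ((l.foldl (fun (st : List String × Int) p =>
            (st.1 ++ [PySem.Str.slice string (some st.2) (some p.2), p.1], p.2)) (parts, prev)).2)) none
    = catS parts ++ canonC (string.toList.drop prev.toNat) prev (fun j => catS (grp l j)) := by
  induction l generalizing prev parts with
  | nil =>
    rw [List.foldl_nil]
    rw [canon_nilF _ _ _ (fun i _ _ => by simp [grp, catS])]
    rw [show PySem.Chars.slice string.toList (some prev) none = PySem.List.slice string.toList (some prev) none from rfl, PySem.List.slice_from _ h0]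
  | cons q l ih =>
    obtain ⟨t, k⟩ := q
    rcases List.pairwise_cons.mp hs with ⟨hk, hls⟩
    have hkb := hb (t, k) List.mem_cons_self
    have h0k : (0 : Int) ≤ k := le_trans h0 hkb.1
    rw [List.foldl_cons]
    rw [ih k (parts ++ [PySem.Str.slice string (some prev) (some k), t]) hls
      (fun p hp => ⟨hk p hp, (hb p (List.mem_cons_of_mem _ hp)).2⟩) h0k hkb.2]
    rw [catS_append]
    have hslice : catS [PySem.Str.slice string (some prev) (some k), t]
        = (string.toList.drop prev.toNat).take (k.toNat - prev.toNat) ++ t.toList := by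
      simp [catS, PySem.Str.toList_slice, PySem.List.slice_toNat _ h0 h0k]
    rw [hslice]
    -- decompose the suffix of the string at prev into the copied slice and the suffix at k
    have hdecomp : string.toList.drop prev.toNat
        = (string.toList.drop prev.toNat).take (k.toNat - prev.toNat) ++ string.toList.drop k.toNat := by
      conv_lhs => rw [← List.take_append_drop (k.toNat - prev.toNat) (string.toList.drop prev.toNat)]
      rw [List.drop_drop]
      congr 1
      congr 1
      omega
    have hlen : ((string.toList.drop prev.toNat).take (k.toNat - prev.toNat)).length
        = k.toNat - prev.toNat := by
      rw [List.length_take, List.length_drop]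
      omega
    conv_rhs => rw [hdecomp]
    rw [canon_append _ _ _ _ (fun i h1 h2 => by
      -- no insertion strictly before k
      have hik : i < k := by rw [hlen] at h2; omega
      have : (((t, k) :: l).filter (fun p => p.2 == i)) = [] := by
        refine List.filter_eq_nil_iff.mpr ?_
        intro p hp hpj
        have hpi : p.2 = i := by simpa using hpj
        rcases List.mem_cons.mp hp with rfl | hp'
        · simp at hpi; omega
        · have := hk p hp'; omega
      simp [grp, this, catS])]
    rw [hlen]
    have hcast : prev + ((k.toNat - prev.toNat : Nat) : Int) = k := by omega
    rw [hcast]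
    rw [canon_head (string.toList.drop k.toNat) k t.toList
      (fun j => catS (grp ((t, k) :: l) j)) (fun j => catS (grp l j))
      (by simp [grp, List.filter, catS])
      (fun i h1 h2 => by
        have : (((t, k) :: l).filter (fun p => p.2 == i)) = l.filter (fun p => p.2 == i) := by
          simp [List.filter, show (k == i) = false from by simp; omega]
        simp [grp, this])]
    simp [List.append_assoc]

theorem B_chars (string : String) (pairs : List (String × Int)) :
    (solution_alt string pairs).toList
      = canonC string.toList 0
          (fun j => catS (grp (pairs.filter (fun p => decide (0 ≤ p.2) && decide (p.2 ≤ PySem.Str.len string))) j)) := by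
  rw [solution_alt]
  rw [PySem.Str.toList_join, show ("" : String).toList = [] from rfl, join_empty_sep]
  rw [← catS]
  rw [catS_append]
  have hone : catS [PySem.Str.slice string
      (some ((PySem.List.sorted (pairs.filter (fun p => decide (0 ≤ p.2) && decide (p.2 ≤ PySem.Str.len string))) (fun p => p.2)).foldl
        (fun (st : List String × Int) p =>
          (st.1 ++ [PySem.Str.slice string (some st.2) (some p.2), p.1], p.2)) ([], 0)).2) none]
      = PySem.Chars.slice string.toList
          (some ((PySem.List.sorted (pairs.filter (fun p => decide (0 ≤ p.2) && decide (p.2 ≤ PySem.Str.len string))) (fun p => p.2)).foldl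
        (fun (st : List String × Int) p =>
          (st.1 ++ [PySem.Str.slice string (some st.2) (some p.2), p.1], p.2)) ([], 0)).2) none := by
    simp [catS, PySem.Str.toList_slice]
  rw [hone]
  rw [B_merge string _ 0 []
    (PySem.List.sorted_pairwise _ _)
    (fun p hp => by
      have := (PySem.List.mem_sorted _ _ _ _).mp hp
      have hf := List.of_mem_filter this
      simp only [Bool.and_eq_true, decide_eq_true_eq] at hf
      refine ⟨hf.1, ?_⟩
      have h2 := hf.2
      rw [PySem.Str.len_eq] at h2
      exact_mod_cast h2)
    le_rfl (by positivity)]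
  rw [canon_congr _ _ _ (fun j => catS (grp (pairs.filter (fun p => decide (0 ≤ p.2) && decide (p.2 ≤ PySem.Str.len string))) j))
    (fun j _ _ => by
      congr 1
      simp only [grp]
      congr 1
      exact filter_sorted _ j)]
  simp [catS]

-- on positions 0..len, filtering valid pairs does not change the group
theorem grp_filter (string : String) (pairs : List (String × Int)) (j : Int)
    (h0 : 0 ≤ j) (hn : j ≤ (string.toList.length : Int)) :
    grp (pairs.filter (fun p => decide (0 ≤ p.2) && decide (p.2 ≤ PySem.Str.len string))) j
      = grp pairs j := by
  simp only [grp]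
  congr 1
  rw [List.filter_filter]
  refine List.filter_congr ?_
  intro p hp
  by_cases hpj : p.2 = j
  · have hlen2 : ((string.length : Nat) : Int) = ((string.toList.length : Nat) : Int) := by simp
    simp [hpj, h0, PySem.Str.len_eq]
    omega
  · simp [hpj]

-- ===== VERDICT (by name: the statement is the Claim_ definition above) =====
theorem solution_spec : Claim_equal_solution := by
  intro string pairs _
  unfold Spec_solution
  apply String.toList_inj.mp
  rw [A_chars, B_chars]
  exact (canon_congr _ _ _ _ (fun i h1 h2 => by
    rw [grp_filter string pairs i h1 (by simpa using h2)])).symm
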